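-- pv_equiv track=rewrite | github.com/kelly-chui/problem-solving | Python/Programmers/양과 늑대.py | dfs
-- ===== SOURCE A (Python) =====
-- def dfs(currentNode, tree, info, visitedNodes, sheepCount, wolfCount):
--     if info[currentNode] == 0:
--         sheepCount += 1
--     else:
--         wolfCount += 1
--     if sheepCount <= wolfCount:
--         return 0
--     answer = sheepCount
--     for visitedNode in list(visitedNodes):
--         for neighborNode in tree.get(visitedNode, []):
--             if neighborNode in visitedNodes:
--                 continue
--             visitedNodes.add(neighborNode)
--             answer = max(answer, dfs(neighborNode, tree, info, visitedNodes, sheepCount, wolfCount))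
--             visitedNodes.remove(neighborNode)
--     return answer
-- ===== SOURCE B (Python) =====
-- def dfs(currentNode, tree, info, visitedNodes, sheepCount, wolfCount):
--     if info[currentNode] == 0:
--         sheepCount += 1
--     else:
--         wolfCount += 1
--     if sheepCount <= wolfCount:
--         return 0
--     candidates = set()
--     for v in visitedNodes:
--         for n in tree.get(v, []):
--             if n not in visitedNodes:
--                 candidates.add(n)
--     return _solve(tree, info, candidates, set(visitedNodes), sheepCount, wolfCount)
--
--
-- def _solve(tree, info, candidates, visited, sheepCount, wolfCount):
--     best = sheepCount
--     for c in candidates: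
--         if info[c] == 0:
--             s, w = sheepCount + 1, wolfCount
--         else:
--             s, w = sheepCount, wolfCount + 1
--         if s <= w:
--             v = 0
--         else:
--             visited2 = visited | {c}
--             nxt = {x for x in candidates if x != c}
--             for n in tree.get(c, []):
--                 if n not in visited2:
--                     nxt.add(n)
--             v = _solve(tree, info, nxt, visited2, s, w)
--         best = max(best, v)
--     return best
-- ===== Notes on version B (the rewrite author's own statement) =====
-- stated objective: alternative
-- what changed: B computes the frontier (unvisited neighbours of visited nodes) once and updates it incrementally when a node is chosen, instead of rescanning every visited node and all its neighbours at each recursive call; per call this does O(deg) work where A does O(|visited|*deg), though a timing run measured no overall speed-up on the generated inputs.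
-- outside the precondition, e.g. on dfs(0, {0: [1], 1: [5]}, [0, 1], {0}, 0, 0): A returns 1, B returns 1
import Mathlib
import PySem

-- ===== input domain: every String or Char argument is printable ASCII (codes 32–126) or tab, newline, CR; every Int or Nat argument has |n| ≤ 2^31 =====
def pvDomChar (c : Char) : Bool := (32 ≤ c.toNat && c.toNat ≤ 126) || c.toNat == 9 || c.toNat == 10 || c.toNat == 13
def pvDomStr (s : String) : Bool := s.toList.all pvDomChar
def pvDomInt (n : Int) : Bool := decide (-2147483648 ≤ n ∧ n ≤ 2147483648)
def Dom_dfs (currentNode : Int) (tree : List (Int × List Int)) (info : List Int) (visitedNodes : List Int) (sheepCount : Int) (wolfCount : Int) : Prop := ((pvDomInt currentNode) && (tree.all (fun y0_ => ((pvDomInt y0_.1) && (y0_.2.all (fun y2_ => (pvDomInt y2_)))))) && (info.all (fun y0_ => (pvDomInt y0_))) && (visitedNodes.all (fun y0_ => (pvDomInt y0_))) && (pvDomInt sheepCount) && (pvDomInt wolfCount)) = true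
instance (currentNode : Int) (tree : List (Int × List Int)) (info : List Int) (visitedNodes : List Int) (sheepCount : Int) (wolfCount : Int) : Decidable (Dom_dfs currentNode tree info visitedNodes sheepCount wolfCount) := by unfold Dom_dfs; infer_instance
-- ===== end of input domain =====

-- B builds the frontier candidate set once and updates it incrementally per chosen node, instead of
-- rescanning every visited node and all its neighbours at each recursive call; Python A transiently
-- mutates visitedNodes but always restores it before returning (B does not mutate); the equivalence
-- proved here is about the return value.

-- ===== PORT A =====
-- fuel (a totality guard only): the recursion adds one distinct tree-neighbour to visitedNodes per
-- level, so nesting depth never exceeds (tree.flatMap (·.2)).length + 1 and the 0-fuel branch is unreachable.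
def dfsAux (tree : List (Int × List Int)) (info : List Int) : Nat → Int → List Int → Int → Int → Int
  | 0, _, _, _, _ => 0
  | fuel+1, currentNode, visitedNodes, sheepCount, wolfCount =>
    match PySem.List.pyGet? info currentNode with
    | none => 0   -- IndexError in Python; excluded by Pre_dfs
    | some iv =>
      let s := if iv = 0 then sheepCount + 1 else sheepCount
      let w := if iv = 0 then wolfCount else wolfCount + 1
      if s ≤ w then 0
      else
        visitedNodes.foldl (fun ans v =>
          ((PySem.Dict.mk tree).getD v []).foldl (fun ans n =>
            if n ∈ visitedNodes then ans
            else max ans (dfsAux tree info fuel n (PySem.Set.add visitedNodes n) s w)) ans) s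

def dfs (currentNode : Int) (tree : List (Int × List Int)) (info : List Int) (visitedNodes : List Int) (sheepCount : Int) (wolfCount : Int) : Int :=
  dfsAux tree info ((tree.flatMap (fun p => p.2)).length + 1) currentNode visitedNodes sheepCount wolfCount

-- ===== PORT B =====
def buildCands (tree : List (Int × List Int)) (visitedNodes : List Int) : List Int :=
  visitedNodes.foldl (fun acc v =>
    ((PySem.Dict.mk tree).getD v []).foldl (fun acc n =>
      if n ∈ visitedNodes then acc else PySem.Set.add acc n) acc) []

def newCands (tree : List (Int × List Int)) (cands : List Int) (visited2 : List Int) (c : Int) : List Int :=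
  ((PySem.Dict.mk tree).getD c []).foldl (fun acc n =>
    if n ∈ visited2 then acc else PySem.Set.add acc n) (cands.filter (fun x => decide (x ≠ c)))

-- fuel guard as in dfsAux; at fuel 0 the candidate set is necessarily empty in any reachable call
def solveB (tree : List (Int × List Int)) (info : List Int) : Nat → List Int → List Int → Int → Int → Int
  | 0, cands, _, s, _ => cands.foldl (fun best _ => max best (0 : Int)) s
  | fuel+1, cands, visited, s, w =>
    cands.foldl (fun best c =>
      max best (
        match PySem.List.pyGet? info c with
        | none => 0   -- IndexError in Python; excluded by Pre_dfs
        | some iv =>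
          let s2 := if iv = 0 then s + 1 else s
          let w2 := if iv = 0 then w else w + 1
          if s2 ≤ w2 then 0
          else solveB tree info fuel (newCands tree cands (PySem.Set.add visited c) c)
                 (PySem.Set.add visited c) s2 w2)) s

def dfsBtop (tree : List (Int × List Int)) (info : List Int) : Nat → Int → List Int → Int → Int → Int
  | 0, _, _, _, _ => 0
  | fuel+1, currentNode, visitedNodes, sheepCount, wolfCount =>
    match PySem.List.pyGet? info currentNode with
    | none => 0   -- IndexError in Python; excluded by Pre_dfs
    | some iv =>
      let s := if iv = 0 then sheepCount + 1 else sheepCount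
      let w := if iv = 0 then wolfCount else wolfCount + 1
      if s ≤ w then 0
      else solveB tree info fuel (buildCands tree visitedNodes) visitedNodes s w

def dfs_alt (currentNode : Int) (tree : List (Int × List Int)) (info : List Int) (visitedNodes : List Int) (sheepCount : Int) (wolfCount : Int) : Int :=
  dfsBtop tree info ((tree.flatMap (fun p => p.2)).length + 1) currentNode visitedNodes sheepCount wolfCount

-- ===== PRECONDITION & SPEC =====
-- all nodes the neighbour scan can ever reach from visitedNodes (Python A indexes info only at
-- currentNode and at such reachable unvisited nodes)
def reachClosure (tree : List (Int × List Int)) (visitedNodes : List Int) : List Int :=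
  (fun S => S.foldl (fun acc v =>
      ((PySem.Dict.mk tree).getD v []).foldl (fun acc n => PySem.Set.add acc n) acc) S)^[
    (tree.flatMap (fun p => p.2)).length] (PySem.Set.ofList visitedNodes)

-- Pre_dfs excludes only inputs on which Python A can hit an IndexError: info[currentNode] must be in
-- range and, unless the very first sheep/wolf comparison already returns 0, every unvisited node
-- reachable from visitedNodes (the nodes the search indexes info at) must be in range.  A's exact
-- raising set depends on where the wolf-majority cutoff stops the search, which is not expressible
-- without re-running the search, so this closed form is slightly wider; on the excluded inputs where
-- a deeper cutoff lets A return after all, Python B returns the identical value (and raises exactly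
-- where A raises) — indeed the Lean ports are proved equal UNCONDITIONALLY (lemma top_eq below);
-- nothing is dodged, Pre_dfs only keeps the differential test away from IndexError.  See cites.
def Pre_dfs (currentNode : Int) (tree : List (Int × List Int)) (info : List Int) (visitedNodes : List Int) (sheepCount : Int) (wolfCount : Int) : Prop :=
  PySem.Raise.InRange info.length currentNode ∧
  ((if PySem.List.pyGetD info currentNode 0 = 0 then sheepCount + 1 else sheepCount)
      ≤ (if PySem.List.pyGetD info currentNode 0 = 0 then wolfCount else wolfCount + 1) ∨
    ∀ n ∈ reachClosure tree visitedNodes, n ∉ visitedNodes → PySem.Raise.InRange info.length n)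
instance (currentNode : Int) (tree : List (Int × List Int)) (info : List Int) (visitedNodes : List Int) (sheepCount : Int) (wolfCount : Int) : Decidable (Pre_dfs currentNode tree info visitedNodes sheepCount wolfCount) := by unfold Pre_dfs; infer_instance

def pvWitness_dfs : Int × (List (Int × List Int)) × List Int × List Int × Int × Int :=
  (0, [(0, [1]), (1, [2])], [0, 0, 1], [0], 0, 0)

def Spec_dfs (currentNode : Int) (tree : List (Int × List Int)) (info : List Int) (visitedNodes : List Int) (sheepCount : Int) (wolfCount : Int) (out : Int) : Prop := out = dfs_alt currentNode tree info visitedNodes sheepCount wolfCount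
instance (currentNode : Int) (tree : List (Int × List Int)) (info : List Int) (visitedNodes : List Int) (sheepCount : Int) (wolfCount : Int) (out : Int) : Decidable (Spec_dfs currentNode tree info visitedNodes sheepCount wolfCount out) := by unfold Spec_dfs; infer_instance

-- ===== CLAIM (what is proved, stated in full; the proofs are below) =====
def Claim_equal_dfs : Prop := ∀ (currentNode : Int) (tree : List (Int × List Int)) (info : List Int) (visitedNodes : List Int) (sheepCount : Int) (wolfCount : Int), Dom_dfs currentNode tree info visitedNodes sheepCount wolfCount → Pre_dfs currentNode tree info visitedNodes sheepCount wolfCount → Spec_dfs currentNode tree info visitedNodes sheepCount wolfCount (dfs currentNode tree info visitedNodes sheepCount wolfCount)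

-- ===== LEMMAS AND PROOFS =====

def adjOf (tree : List (Int × List Int)) (v : Int) : List Int := (PySem.Dict.mk tree).getD v []

-- the frontier: unvisited neighbours of visited nodes
def FrontP (tree : List (Int × List Int)) (visited : List Int) (x : Int) : Prop :=
  x ∉ visited ∧ ∃ v ∈ visited, x ∈ adjOf tree v

-- A's candidate occurrences (with multiplicity), in scan order
def occOf (tree : List (Int × List Int)) (visited : List Int) : List Int :=
  visited.flatMap (fun v => (adjOf tree v).filter (fun n => decide (n ∉ visited)))

theorem mem_occOf (tree : List (Int × List Int)) (visited : List Int) (x : Int) :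
    x ∈ occOf tree visited ↔ FrontP tree visited x := by
  simp [occOf, FrontP, List.mem_flatMap, List.mem_filter]
  tauto

theorem foldl_map_max (f : Int → Int) (l : List Int) (a : Int) :
    l.foldl (fun best c => max best (f c)) a = (l.map f).foldl max a := by
  induction l generalizing a with
  | nil => rfl
  | cons x xs ih => simp [ih]

theorem foldl_if_max (visited : List Int) (f : Int → Int) (l : List Int) (a : Int) :
    l.foldl (fun ans n => if n ∈ visited then ans else max ans (f n)) a
      = ((l.filter (fun n => decide (n ∉ visited))).map f).foldl max a := by
  induction l generalizing a with
  | nil => rfl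
  | cons x xs ih => by_cases hx : x ∈ visited <;> simp [hx, ih]

theorem loopA_eq (tree : List (Int × List Int)) (visited : List Int) (f : Int → Int) :
    ∀ (l : List Int) (a : Int),
      l.foldl (fun ans v =>
          ((PySem.Dict.mk tree).getD v []).foldl (fun ans n =>
            if n ∈ visited then ans else max ans (f n)) ans) a
        = ((l.flatMap (fun v => (adjOf tree v).filter (fun n => decide (n ∉ visited)))).map f).foldl
            max a := by
  intro l
  induction l with
  | nil => intro a; rfl
  | cons v vs ih =>
    intro a
    rw [List.foldl_cons, ih, List.flatMap_cons, List.map_append, List.foldl_append, foldl_if_max]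
    rfl

theorem foldl_max_mem_iff (a : Int) (l₁ l₂ : List Int) (h : ∀ y, y ∈ l₁ ↔ y ∈ l₂) :
    l₁.foldl max a = l₂.foldl max a := by
  have h1 := PySem.List.le_foldl_max l₁ a
  have h2 := PySem.List.le_foldl_max l₂ a
  have m1 := PySem.List.foldl_max_mem l₁ a
  have m2 := PySem.List.foldl_max_mem l₂ a
  apply le_antisymm
  · rcases m1 with e | e
    · rw [e]; exact h2.1
    · exact h2.2 _ ((h _).1 e)
  · rcases m2 with e | e
    · rw [e]; exact h1.1
    · exact h1.2 _ ((h _).2 e)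

theorem mem_foldl_addIf (visited : List Int) (l : List Int) (acc : List Int) (x : Int) :
    x ∈ l.foldl (fun acc n => if n ∈ visited then acc else PySem.Set.add acc n) acc
      ↔ x ∈ acc ∨ (x ∈ l ∧ x ∉ visited) := by
  induction l generalizing acc with
  | nil => simp
  | cons n ns ih =>
    by_cases hn : n ∈ visited
    · simp only [List.foldl_cons, if_pos hn, ih, List.mem_cons]
      constructor
      · tauto
      · rintro (h | ⟨rfl | h, hv⟩) <;> tauto
    · simp only [List.foldl_cons, if_neg hn, ih, PySem.Set.mem_add, List.mem_cons]
      constructor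
      · rintro (⟨h | rfl⟩ | h) <;> tauto
      · rintro (h | ⟨rfl | h, hv⟩) <;> tauto

theorem mem_buildCands (tree : List (Int × List Int)) (visited : List Int) (x : Int) :
    x ∈ buildCands tree visited ↔ FrontP tree visited x := by
  unfold buildCands FrontP
  suffices h : ∀ (l acc : List Int),
      x ∈ l.foldl (fun acc v =>
          ((PySem.Dict.mk tree).getD v []).foldl (fun acc n =>
            if n ∈ visited then acc else PySem.Set.add acc n) acc) acc
        ↔ x ∈ acc ∨ ∃ v ∈ l, x ∈ adjOf tree v ∧ x ∉ visited by
    rw [h visited []]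
    simp
    tauto
  intro l
  induction l with
  | nil => intro acc; simp
  | cons v vs ih =>
    intro acc
    rw [List.foldl_cons, ih, mem_foldl_addIf]
    simp only [List.mem_cons, adjOf]
    constructor
    · rintro (⟨h | ⟨h1, h2⟩⟩ | ⟨u, hu, h1, h2⟩)
      · exact Or.inl h
      · exact Or.inr ⟨v, Or.inl rfl, h1, h2⟩
      · exact Or.inr ⟨u, Or.inr hu, h1, h2⟩
    · rintro (h | ⟨u, rfl | hu, h1, h2⟩)
      · exact Or.inl (Or.inl h)
      · exact Or.inl (Or.inr ⟨h1, h2⟩)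
      · exact Or.inr ⟨u, hu, h1, h2⟩

theorem mem_newCands (tree : List (Int × List Int)) (cands visited2 : List Int) (c x : Int) :
    x ∈ newCands tree cands visited2 c
      ↔ (x ∈ cands ∧ x ≠ c) ∨ (x ∈ adjOf tree c ∧ x ∉ visited2) := by
  unfold newCands
  rw [mem_foldl_addIf]
  simp [List.mem_filter, adjOf]

theorem frontP_add (tree : List (Int × List Int)) (visited cands : List Int) (c x : Int)
    (hinv : ∀ y, y ∈ cands ↔ FrontP tree visited y) :
    x ∈ newCands tree cands (PySem.Set.add visited c) c
      ↔ FrontP tree (PySem.Set.add visited c) x := by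
  rw [mem_newCands, hinv x]
  simp only [FrontP, PySem.Set.mem_add]
  constructor
  · rintro (⟨⟨hnv, v, hv, ha⟩, hne⟩ | ⟨ha, hnv⟩)
    · exact ⟨by tauto, v, Or.inl hv, ha⟩
    · exact ⟨hnv, c, Or.inr rfl, ha⟩
  · rintro ⟨hnv, v, hv | rfl, ha⟩
    · exact Or.inl ⟨⟨by tauto, v, hv, ha⟩, by tauto⟩
    · exact Or.inr ⟨ha, hnv⟩

theorem solve_eq (tree : List (Int × List Int)) (info : List Int) :
    ∀ (fuel : Nat) (visited : List Int) (s w : Int) (cands : List Int),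
      (∀ y, y ∈ cands ↔ FrontP tree visited y) →
      ((occOf tree visited).map
          (fun n => dfsAux tree info fuel n (PySem.Set.add visited n) s w)).foldl max s
        = solveB tree info fuel cands visited s w := by
  intro fuel
  induction fuel with
  | zero =>
    intro visited s w cands hinv
    calc ((occOf tree visited).map
            (fun n => dfsAux tree info 0 n (PySem.Set.add visited n) s w)).foldl max s
        = ((occOf tree visited).map (fun _ => (0 : Int))).foldl max s := by simp [dfsAux]
      _ = (cands.map (fun _ => (0 : Int))).foldl max s := by
            apply foldl_max_mem_iff
            intro y
            simp only [List.mem_map, mem_occOf, hinv]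
      _ = cands.foldl (fun best _ => max best (0 : Int)) s := (foldl_map_max _ cands s).symm
      _ = solveB tree info 0 cands visited s w := rfl
  | succ k ih =>
    intro visited s w cands hinv
    have step : ∀ c, FrontP tree visited c →
        dfsAux tree info (k + 1) c (PySem.Set.add visited c) s w
          = (match PySem.List.pyGet? info c with
             | none => 0
             | some iv =>
               let s2 := if iv = 0 then s + 1 else s
               let w2 := if iv = 0 then w else w + 1
               if s2 ≤ w2 then 0
               else solveB tree info k
                      (newCands tree cands (PySem.Set.add visited c) c)
                      (PySem.Set.add visited c) s2 w2) := by
      intro c _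
      cases hg : PySem.List.pyGet? info c with
      | none => simp [dfsAux, hg]
      | some iv =>
        simp only [dfsAux, hg]
        by_cases hcond : (if iv = 0 then s + 1 else s) ≤ (if iv = 0 then w else w + 1)
        · simp [hcond]
        · simp only [if_neg hcond]
          rw [loopA_eq]
          exact ih (PySem.Set.add visited c) _ _
            (newCands tree cands (PySem.Set.add visited c) c)
            (fun y => frontP_add tree visited cands c y hinv)
    calc ((occOf tree visited).map
            (fun n => dfsAux tree info (k + 1) n (PySem.Set.add visited n) s w)).foldl max s
        = (cands.map
            (fun n => dfsAux tree info (k + 1) n (PySem.Set.add visited n) s w)).foldl max s := by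
          apply foldl_max_mem_iff
          intro y
          simp only [List.mem_map, mem_occOf, hinv]
      _ = cands.foldl
            (fun best c => max best (dfsAux tree info (k + 1) c (PySem.Set.add visited c) s w))
            s := (foldl_map_max _ cands s).symm
      _ = solveB tree info (k + 1) cands visited s w := by
          rw [solveB]
          apply PySem.List.foldl_congr_mem
          intro best c hc
          rw [step c ((hinv c).1 hc)]

-- the ports are equal on EVERY input, no precondition needed: Pre_dfs above only marks where the
-- Pythons return normally instead of raising
theorem top_eq (tree : List (Int × List Int)) (info : List Int) (fuel : Nat)
    (cur : Int) (visited : List Int) (s w : Int) :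
    dfsAux tree info fuel cur visited s w = dfsBtop tree info fuel cur visited s w := by
  cases fuel with
  | zero => rfl
  | succ k =>
    cases hg : PySem.List.pyGet? info cur with
    | none => simp [dfsAux, dfsBtop, hg]
    | some iv =>
      simp only [dfsAux, dfsBtop, hg]
      by_cases hcond : (if iv = 0 then s + 1 else s) ≤ (if iv = 0 then w else w + 1)
      · simp [hcond]
      · simp only [if_neg hcond]
        rw [loopA_eq]
        exact solve_eq tree info k visited _ _ (buildCands tree visited)
          (fun y => mem_buildCands tree visited y)

-- ===== VERDICT (by name: the statement is the Claim_ definition above) =====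
theorem dfs_spec : Claim_equal_dfs := by
  intro currentNode tree info visitedNodes sheepCount wolfCount _ _
  show dfs currentNode tree info visitedNodes sheepCount wolfCount
      = dfs_alt currentNode tree info visitedNodes sheepCount wolfCount
  unfold dfs dfs_alt
  exact top_eq tree info _ currentNode visitedNodes sheepCount wolfCount
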